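-- pv_equiv track=rewrite | github.com/sangminsang/mahjong_yolo_project | apis/score/logic.py | is_chuuren_poutou_9wait
-- ===== SOURCE A (Python) =====
-- from collections import defaultdict
--
-- def is_chinitsu(head, tiles, ankan_sets, ming_sets):
--     if not head:  # ✅ 치또이츠 경우 처리
--         return False
--
--     """청일색 판정"""
--     # 모든 타일 수집
--     all_tiles = []
--     # 1. 기본 타일
--     all_tiles.extend(tiles)
--     # 2. 안깡 타일 추가
--     for ankan in ankan_sets:
--         all_tiles.extend(ankan)
--     # 3. 밍커/밍깡 타일 추가
--     for ming_type, ming_tiles in ming_sets: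
--         all_tiles.extend(ming_tiles)
--
--     # 자패 존재 여부 확인
--     if any(t.endswith('z') for t in all_tiles):
--         return False
--
--     # 모든 수패가 동일 종류인지 확인
--     suits = {t[-1] for t in all_tiles}
--     return len(suits) == 1
--
-- def is_chuuren_poutou_9wait(head, tiles, winning_tile):
--     """순정구련보등 판정 (9면 대기 검증 추가)"""
--     # 1. 청일색 확인
--     if not is_chinitsu(head, tiles, [], []):
--         return False
--
--     suit = tiles[0][-1]  # 패 종류 추출 (m/p/s)
--     required_structure = {
--         '1': 3, '2': 1, '3': 1, '4': 1,
--         '5': 1, '6': 1, '7': 1, '8': 1, '9': 3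
--     }
--
--     # 2. 실제 패 개수 세기 (적도라 변환 후)
--     counts = defaultdict(int)
--     for tile in tiles:
--         num = tile[0] if not tile.startswith('r') else tile[1]
--         counts[num] += 1
--
--     # 3. 구조 검증 (4장짜리 패 존재 시 실패)
--     for num, req_count in required_structure.items():
--         if counts.get(num, 0) != req_count + (1 if num == winning_tile[0] else 0):
--             return False
--
--     # 4. 9면 대기 확인
--     winning_num = winning_tile[0]
--     return all(
--         counts.get(str(i), 0) >= (1 if i != int(winning_num) else 2)
--         for i in range(1, 10)
--     )
-- ===== SOURCE B (Python) =====
-- def is_chuuren_poutou_9wait(head, tiles, winning_tile):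
--     """Pure nine-gates 9-wait: flush guard, then one sorted-multiset comparison."""
--     if not head or not tiles:
--         return False
--     if any(t.endswith('z') for t in tiles):
--         return False
--     if len({t[-1] for t in tiles}) != 1:
--         return False
--     w = winning_tile[0]
--     nums = [t[1] if t.startswith('r') else t[0] for t in tiles]
--     digits = [c for c in nums if c in '123456789']
--     target = list('1112345678999') + ([w] if w in '123456789' else [])
--     return sorted(digits) == sorted(target)
-- ===== Notes on version B (the rewrite author's own statement) =====
-- stated objective: simpler
-- what changed: B replaces A's defaultdict build plus two separate count-checking passes (the 9-key structure loop and the redundant 9-wait all() pass) by a single sorted-multiset comparison of the hand's normalized digit characters against the expected nine-gates multiset '1112345678999' plus the winning digit.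
import Mathlib
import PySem

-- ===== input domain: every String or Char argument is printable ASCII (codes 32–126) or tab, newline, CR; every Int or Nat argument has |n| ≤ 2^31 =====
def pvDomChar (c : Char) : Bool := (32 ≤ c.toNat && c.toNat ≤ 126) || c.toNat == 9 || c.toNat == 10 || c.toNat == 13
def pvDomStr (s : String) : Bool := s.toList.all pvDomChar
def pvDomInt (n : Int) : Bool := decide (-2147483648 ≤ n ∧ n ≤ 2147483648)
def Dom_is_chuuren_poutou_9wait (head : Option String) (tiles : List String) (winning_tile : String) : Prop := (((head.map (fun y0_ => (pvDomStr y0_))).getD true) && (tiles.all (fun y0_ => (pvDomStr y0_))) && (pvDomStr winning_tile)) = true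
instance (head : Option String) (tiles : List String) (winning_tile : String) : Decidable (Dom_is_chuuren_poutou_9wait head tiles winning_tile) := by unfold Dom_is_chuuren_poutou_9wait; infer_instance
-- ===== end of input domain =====

-- B replaces A's two count-checking passes (step 3 + the redundant 9-wait pass) by one
-- sorted-multiset comparison against the expected nine-gates hand; equivalence is about the return value only.

-- shared tiny character helpers (used by both ports and by Pre_)
-- t[-1] — exact when t ≠ "" (t = "" is excluded by Pre_ wherever A reaches this)
def pvLast (t : String) : Char := (PySem.Str.pyGet? t (-1)).getD ' '
-- tile[1] if tile.startswith('r') else tile[0] — exact when the index is in range (Pre_)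
def pvNorm (t : String) : Char :=
  if PySem.Str.startswith t "r" then (PySem.Str.pyGet? t 1).getD ' '
  else (PySem.Str.pyGet? t 0).getD ' '
def pvDigits : List Char := ['1','2','3','4','5','6','7','8','9']

-- ===== PORT A =====
def pvIsChinitsu (head : Option String) (tiles : List String)
    (ankan_sets : List (List String)) (ming_sets : List (String × List String)) : Bool :=
  match head with
  | none => false
  | some h =>
    if h = "" then false
    else
      let all_tiles : List String := ([] : List String) ++ tiles
      let all_tiles := ankan_sets.foldl (fun acc a => acc ++ a) all_tiles
      let all_tiles := ming_sets.foldl (fun acc m => acc ++ m.2) all_tiles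
      if all_tiles.any (fun t => PySem.Str.endswith t "z") then false
      else (PySem.Set.ofList (all_tiles.map pvLast)).length == 1

def pvRequired : PySem.Dict Char Int :=
  PySem.Dict.mk [('1',3),('2',1),('3',1),('4',1),('5',1),('6',1),('7',1),('8',1),('9',3)]

def is_chuuren_poutou_9wait (head : Option String) (tiles : List String) (winning_tile : String) : Bool :=
  if !(pvIsChinitsu head tiles [] []) then false
  else
    let _suit := pvLast (tiles.getD 0 "")   -- suit is computed by A but never used
    let counts : PySem.Dict Char Int :=
      tiles.foldl (fun d t => d.modify (pvNorm t) 0 (· + 1)) PySem.Dict.empty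
    let w : Char := (PySem.Str.pyGet? winning_tile 0).getD ' '   -- winning_tile[0]; exact when winning_tile ≠ ""
    if pvRequired.items.all (fun p => counts.getD p.1 0 == p.2 + (if p.1 == w then 1 else 0)) then
      -- int(winning_num): exact when w is a decimal digit (Pre_)
      let wnum : Int := (PySem.Int.ofStr? (String.singleton w)).getD 0
      -- str(i) for i ∈ 1..9 is the single digit character
      (PySem.List.pyRange 1 10 1).all (fun i =>
        decide ((if i ≠ wnum then (1:Int) else 2) ≤ counts.getD (Char.ofNat (48 + i.toNat)) 0))
    else false

-- ===== PORT B =====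
def is_chuuren_poutou_9wait_alt (head : Option String) (tiles : List String) (winning_tile : String) : Bool :=
  match head with
  | none => false
  | some h =>
    if h = "" || tiles.isEmpty then false
    else if tiles.any (fun t => PySem.Str.endswith t "z") then false
    else if !((PySem.Set.ofList (tiles.map pvLast)).length == 1) then false
    else
      let w : Char := (PySem.Str.pyGet? winning_tile 0).getD ' '
      let digits := (tiles.map pvNorm).filter (fun c => c ∈ pvDigits)
      let target := "1112345678999".toList ++ (if w ∈ pvDigits then [w] else [])
      PySem.List.sorted digits (fun x => x) false == PySem.List.sorted target (fun x => x) false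

-- ===== PRECONDITION & SPEC =====
def pvTruthy (head : Option String) : Bool :=
  match head with | none => false | some h => !(h = "")
def pvNoZ (tiles : List String) : Bool := tiles.all (fun t => !PySem.Str.endswith t "z")
def pvChin (head : Option String) (tiles : List String) : Bool :=
  pvTruthy head && !tiles.isEmpty && pvNoZ tiles
    && ((PySem.Set.ofList (tiles.map pvLast)).length == 1)
def pvReq (d : Char) : Int := if d = '1' ∨ d = '9' then 3 else 1
def pvExact (tiles : List String) : Bool :=
  pvDigits.all (fun d => ((tiles.map pvNorm).count d : Int) == pvReq d)

-- Pre_ excludes exactly the inputs on which A raises: IndexError on an empty tile (truthy head,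
-- no 'z' tile), on a bare "r" tile or an empty winning_tile once the flush guard passed, and
-- ValueError at int(winning_tile[0]) when that char is not a decimal digit and the hand counts
-- match the nine-gates structure exactly.
def Pre_is_chuuren_poutou_9wait (head : Option String) (tiles : List String) (winning_tile : String) : Prop :=
  ((pvTruthy head && pvNoZ tiles && tiles.contains "") = false)
  ∧ (pvChin head tiles = true →
      "r" ∉ tiles ∧ winning_tile ≠ ""
      ∧ (winning_tile.toList.headD ' ' ∈ ('0' :: pvDigits) ∨ pvExact tiles = false))

instance (head : Option String) (tiles : List String) (winning_tile : String) : Decidable (Pre_is_chuuren_poutou_9wait head tiles winning_tile) := by unfold Pre_is_chuuren_poutou_9wait; infer_instance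

def pvWitness_is_chuuren_poutou_9wait : Option String × List String × String :=
  (some "1m", ["1m", "2m"], "1m")

def Spec_is_chuuren_poutou_9wait (head : Option String) (tiles : List String) (winning_tile : String) (out : Bool) : Prop := out = is_chuuren_poutou_9wait_alt head tiles winning_tile
instance (head : Option String) (tiles : List String) (winning_tile : String) (out : Bool) : Decidable (Spec_is_chuuren_poutou_9wait head tiles winning_tile out) := by unfold Spec_is_chuuren_poutou_9wait; infer_instance

-- ===== CLAIM (what is proved, stated in full; the proofs are below) =====
def Claim_equal_is_chuuren_poutou_9wait : Prop := ∀ (head : Option String) (tiles : List String) (winning_tile : String), Dom_is_chuuren_poutou_9wait head tiles winning_tile → Pre_is_chuuren_poutou_9wait head tiles winning_tile → Spec_is_chuuren_poutou_9wait head tiles winning_tile (is_chuuren_poutou_9wait head tiles winning_tile)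

-- ===== LEMMAS AND PROOFS =====

lemma pvCounts_getD (tiles : List String) (c : Char) :
    (tiles.foldl (fun d t => d.modify (pvNorm t) 0 (· + 1)) PySem.Dict.empty).getD c 0
      = (((tiles.map pvNorm).count c : Int)) := by
  have h2 := List.foldl_map (f := pvNorm) (g := fun (d : PySem.Dict Char Int) x => d.modify x 0 (· + 1)) (l := tiles) (init := PySem.Dict.empty)
  rw [← h2, PySem.Dict.getD_foldl_modify_add_one]
  simp

lemma pvBaseEq : "1112345678999".toList = ['1','1','1','2','3','4','5','6','7','8','9','9','9'] := by
  simp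

lemma pvBaseAll : ∀ x ∈ "1112345678999".toList, x ∈ pvDigits := by
  rw [pvBaseEq]
  have h : (['1','1','1','2','3','4','5','6','7','8','9','9','9'] : List Char).all
      (fun x => decide (x ∈ pvDigits)) = true := by decide
  simpa using h

lemma pvBaseCount : ∀ d ∈ pvDigits, (List.count d "1112345678999".toList : Int) = pvReq d := by
  have h : pvDigits.all (fun d => (List.count d "1112345678999".toList : Int) == pvReq d) = true := by
    rw [pvBaseEq]; decide
  intro d hd
  simpa using List.all_eq_true.mp h d hd

lemma pvPermIff (nums : List Char) (c : Char) :
    ((PySem.List.sorted (nums.filter (fun x => x ∈ pvDigits)) (fun x => x) false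
      == PySem.List.sorted ("1112345678999".toList ++ (if c ∈ pvDigits then [c] else [])) (fun x => x) false) = true)
      ↔ ∀ d ∈ pvDigits, ((nums.count d : Int)) = pvReq d + (if d = c then 1 else 0) := by
  rw [beq_iff_eq, PySem.List.sorted_id_eq_sorted_id_iff_perm, List.perm_iff_count]
  have hwpart : ∀ d ∈ pvDigits,
      ((List.count d (if c ∈ pvDigits then [c] else []) : Int)) = if d = c then 1 else 0 := by
    intro d hd
    by_cases hc : c ∈ pvDigits
    · by_cases hdc : d = c
      · subst hdc; simp [hc]
      · rw [if_pos hc, if_neg hdc]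
        have : List.count d [c] = 0 := List.count_eq_zero.mpr (by simp [hdc])
        simp [this]
    · have hdc : d ≠ c := fun h => hc (h ▸ hd)
      simp [hc, hdc]
  constructor
  · intro h d hd
    have hh := h d
    rw [List.count_append, List.count_filter (by simpa using hd)] at hh
    have hb := pvBaseCount d hd
    have hw := hwpart d hd
    omega
  · intro hE a
    by_cases ha : a ∈ pvDigits
    · rw [List.count_append, List.count_filter (by simpa using ha)]
      have hb := pvBaseCount a ha
      have hw := hwpart a ha
      have he := hE a ha
      omega
    · have h1 : List.count a (nums.filter (fun x => x ∈ pvDigits)) = 0 := by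
        refine List.count_eq_zero.mpr (fun hm => ha ?_)
        simpa using (List.mem_filter.mp hm).2
      have h2 : List.count a ("1112345678999".toList ++ (if c ∈ pvDigits then [c] else [])) = 0 := by
        refine List.count_eq_zero.mpr (fun hm => ?_)
        rcases List.mem_append.mp hm with hm | hm
        · exact ha (pvBaseAll a hm)
        · by_cases hc : c ∈ pvDigits
          · simp [hc] at hm; exact ha (hm ▸ hc)
          · simp [hc] at hm
      rw [h1, h2]

lemma pvStep3Iff (nums : List Char) (c : Char) :
    (([(('1':Char),(3:Int)),('2',1),('3',1),('4',1),('5',1),('6',1),('7',1),('8',1),('9',3)].all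
       (fun p => ((nums.count p.1 : Int) == p.2 + (if p.1 == c then 1 else 0)))) = true)
      ↔ ∀ d ∈ pvDigits, ((nums.count d : Int)) = pvReq d + (if d = c then 1 else 0) := by
  simp [pvDigits, pvReq, List.all_cons, Bool.and_eq_true, beq_iff_eq]

set_option maxHeartbeats 2000000 in
lemma pvStep4 (nums : List Char) (c : Char) (hc : c ∈ ('0' :: pvDigits))
    (hE : ∀ d ∈ pvDigits, ((nums.count d : Int)) = pvReq d + (if d = c then 1 else 0)) :
    ((PySem.List.pyRange 1 10 1).all (fun i =>
      decide ((if i ≠ ((PySem.Int.ofStr? (String.singleton c)).getD 0) then (1:Int) else 2)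
        ≤ (nums.count (Char.ofNat (48 + i.toNat)) : Int)))) = true := by
  have hr9 : PySem.List.pyRange 1 10 1 = [1,2,3,4,5,6,7,8,9] := by decide
  have h1 := hE '1' (by decide); have h2 := hE '2' (by decide); have h3 := hE '3' (by decide)
  have h4 := hE '4' (by decide); have h5 := hE '5' (by decide); have h6 := hE '6' (by decide)
  have h7 := hE '7' (by decide); have h8 := hE '8' (by decide); have h9 := hE '9' (by decide)
  have e1 : Char.ofNat (48 + (1:Int).toNat) = '1' := by decide
  have e2 : Char.ofNat (48 + (2:Int).toNat) = '2' := by decide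
  have e3 : Char.ofNat (48 + (3:Int).toNat) = '3' := by decide
  have e4 : Char.ofNat (48 + (4:Int).toNat) = '4' := by decide
  have e5 : Char.ofNat (48 + (5:Int).toNat) = '5' := by decide
  have e6 : Char.ofNat (48 + (6:Int).toNat) = '6' := by decide
  have e7 : Char.ofNat (48 + (7:Int).toNat) = '7' := by decide
  have e8 : Char.ofNat (48 + (8:Int).toNat) = '8' := by decide
  have e9 : Char.ofNat (48 + (9:Int).toNat) = '9' := by decide
  have w0 : ((PySem.Int.ofStr? (String.singleton '0')).getD 0) = 0 := by decide
  have w1 : ((PySem.Int.ofStr? (String.singleton '1')).getD 0) = 1 := by decide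
  have w2 : ((PySem.Int.ofStr? (String.singleton '2')).getD 0) = 2 := by decide
  have w3 : ((PySem.Int.ofStr? (String.singleton '3')).getD 0) = 3 := by decide
  have w4 : ((PySem.Int.ofStr? (String.singleton '4')).getD 0) = 4 := by decide
  have w5 : ((PySem.Int.ofStr? (String.singleton '5')).getD 0) = 5 := by decide
  have w6 : ((PySem.Int.ofStr? (String.singleton '6')).getD 0) = 6 := by decide
  have w7 : ((PySem.Int.ofStr? (String.singleton '7')).getD 0) = 7 := by decide
  have w8 : ((PySem.Int.ofStr? (String.singleton '8')).getD 0) = 8 := by decide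
  have w9 : ((PySem.Int.ofStr? (String.singleton '9')).getD 0) = 9 := by decide
  fin_cases hc <;>
    · simp only [hr9, e1, e2, e3, e4, e5, e6, e7, e8, e9, w0, w1, w2, w3, w4, w5, w6, w7, w8, w9,
        List.all_cons, List.all_nil, Bool.and_eq_true, Bool.and_true, decide_eq_true_eq]
      simp [pvReq] at h1 h2 h3 h4 h5 h6 h7 h8 h9
      norm_num
      repeat' apply And.intro
      all_goals first
        | omega
        | (apply List.count_pos_iff.mp; omega)

lemma pvATrueIff (head : Option String) (tiles : List String) (wt : String) (ch : Char)
    (hchinA : pvIsChinitsu head tiles [] [] = true)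
    (hc : (PySem.Str.pyGet? wt 0).getD ' ' = ch)
    (hcd : ch ∈ ('0' :: pvDigits) ∨ pvExact tiles = false) :
    (is_chuuren_poutou_9wait head tiles wt = true)
      ↔ ∀ d ∈ pvDigits, (((tiles.map pvNorm).count d : Int)) = pvReq d + (if d = ch then 1 else 0) := by
  unfold is_chuuren_poutou_9wait
  rw [if_neg (by simp [hchinA])]
  have hitems : pvRequired.items
      = [(('1':Char),(3:Int)),('2',1),('3',1),('4',1),('5',1),('6',1),('7',1),('8',1),('9',3)] := rfl
  simp only [hitems, hc, pvCounts_getD]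
  by_cases h3 : (([(('1':Char),(3:Int)),('2',1),('3',1),('4',1),('5',1),('6',1),('7',1),('8',1),('9',3)].all
      (fun p => (((tiles.map pvNorm).count p.1 : Int) == p.2 + (if p.1 == ch then 1 else 0)))) = true)
  · rw [if_pos h3]
    have hE := (pvStep3Iff (tiles.map pvNorm) ch).mp h3
    have hcd' : ch ∈ ('0' :: pvDigits) := by
      rcases hcd with h | h
      · exact h
      · by_contra hnot
        have hx : pvExact tiles = true := by
          unfold pvExact
          rw [List.all_eq_true]
          intro d hd
          have hdch : d ≠ ch := fun e => hnot (e ▸ List.mem_cons_of_mem _ hd)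
          have := hE d hd
          rw [if_neg hdch] at this
          simpa using this
        rw [hx] at h
        exact absurd h (by simp)
    rw [pvStep4 (tiles.map pvNorm) ch hcd' hE]
    exact iff_of_true rfl hE
  · rw [if_neg h3]
    constructor
    · intro hf; exact absurd hf (by simp)
    · intro hE; exact absurd ((pvStep3Iff (tiles.map pvNorm) ch).mpr hE) h3

lemma pvBTrueIff (h : String) (tiles : List String) (wt : String) (ch : Char)
    (hh : ¬ h = "") (hne : tiles ≠ [])
    (hz : (tiles.any (fun t => PySem.Str.endswith t "z")) = false)
    (hs : (PySem.Set.ofList (tiles.map pvLast)).length = 1)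
    (hc : (PySem.Str.pyGet? wt 0).getD ' ' = ch) :
    (is_chuuren_poutou_9wait_alt (some h) tiles wt = true)
      ↔ ∀ d ∈ pvDigits, (((tiles.map pvNorm).count d : Int)) = pvReq d + (if d = ch then 1 else 0) := by
  show (if (decide (h = "") || tiles.isEmpty) = true then false
    else if (tiles.any fun t => PySem.Str.endswith t "z") = true then false
    else if (!((PySem.Set.ofList (tiles.map pvLast)).length == 1)) = true then false
    else
      let w : Char := (PySem.Str.pyGet? wt 0).getD ' '
      let digits := (tiles.map pvNorm).filter (fun c => c ∈ pvDigits)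
      let target := "1112345678999".toList ++ (if w ∈ pvDigits then [w] else [])
      PySem.List.sorted digits (fun x => x) false == PySem.List.sorted target (fun x => x) false) = true
      ↔ ∀ d ∈ pvDigits, (((tiles.map pvNorm).count d : Int)) = pvReq d + (if d = ch then 1 else 0)
  rw [if_neg (by simp [hh, hne]), if_neg (by rw [hz]; simp), if_neg (by rw [hs]; simp)]
  simp only [hc]
  exact pvPermIff (tiles.map pvNorm) ch

-- ===== VERDICT (by name: the statement is the Claim_ definition above) =====
theorem is_chuuren_poutou_9wait_spec : Claim_equal_is_chuuren_poutou_9wait := by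
  intro head tiles wt hdom hpre
  unfold Spec_is_chuuren_poutou_9wait
  obtain ⟨hpre1, hpre2⟩ := hpre
  cases head with
  | none => simp [is_chuuren_poutou_9wait, is_chuuren_poutou_9wait_alt, pvIsChinitsu]
  | some h =>
    by_cases hh : h = ""
    · subst hh
      simp [is_chuuren_poutou_9wait, is_chuuren_poutou_9wait_alt, pvIsChinitsu]
    by_cases hz : (tiles.any (fun t => PySem.Str.endswith t "z")) = true
    · simp at hz
      simp [is_chuuren_poutou_9wait, is_chuuren_poutou_9wait_alt, pvIsChinitsu, hh, hz]
    by_cases hs : ((PySem.Set.ofList (tiles.map pvLast)).length = 1)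
    case neg =>
      simp [is_chuuren_poutou_9wait, is_chuuren_poutou_9wait_alt, pvIsChinitsu, hh, hs]
    case pos =>
      have hzf : (tiles.any (fun t => PySem.Str.endswith t "z")) = false := by
        simpa using hz
      have hne : tiles ≠ [] := by
        rintro rfl
        simp [PySem.Set.ofList] at hs
      have hchin : pvChin (some h) tiles = true := by
        simp [pvChin, pvTruthy, pvNoZ, hh, hs, hne, List.isEmpty_eq_false_iff, List.all_eq_true]
        intro t ht
        have := List.any_eq_false.mp hzf t ht
        simpa using this
      obtain ⟨hr, hwne, hdg⟩ := hpre2 hchin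
      obtain ⟨ch, rest, hwl⟩ : ∃ ch rest, wt.toList = ch :: rest := by
        cases hwl' : wt.toList with
        | nil =>
          exfalso
          apply hwne
          have := congrArg String.ofList hwl'
          simpa using this
        | cons a b => exact ⟨a, b, rfl⟩
      have hc : (PySem.Str.pyGet? wt 0).getD ' ' = ch := by
        simp [PySem.Str.pyGet?, hwl]
      have hdg' : ch ∈ ('0' :: pvDigits) ∨ pvExact tiles = false := by
        simpa [hwl] using hdg
      have hchinA : pvIsChinitsu (some h) tiles [] [] = true := by
        simp [pvIsChinitsu, hh, hs]
        intro t ht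
        have := List.any_eq_false.mp hzf t ht
        simpa using this
      rw [Bool.eq_iff_iff, pvATrueIff (some h) tiles wt ch hchinA hc hdg',
        pvBTrueIff h tiles wt ch hh hne hzf hs hc]
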